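-- pv_equiv track=rewrite | github.com/4-DS/sinara-int-tools | visualizer.py | _prettify_url
-- ===== SOURCE A (Python) =====
-- def _prettify_url(url):
--     words = url.split("/")
--     parts = 0
--     result=""
--
--     for i in words[1:]:
--         result = f"{result}/{i}"
--         parts += 1
--         if parts == 3:
--             result = f"{result}\\n"
--             parts = 0
--     return result
-- ===== SOURCE B (Python) =====
-- def _prettify_url(url):
--     segs = url.split("/")[1:]
--     groups = []
--     for i in range(0, len(segs), 3):
--         chunk = segs[i:i+3]
--         g = "/" + "/".join(chunk)
--         if len(chunk) == 3:
--             g = g + "\\n"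
--         groups.append(g)
--     return "".join(groups)
-- ===== Notes on version B (the rewrite author's own statement) =====
-- stated objective: simpler
-- what changed: Replaces A's per-segment string accumulation with a modulo-3 counter by a chunk-based traversal: iterate over range(0, len, 3), build each group by joining the 3-slice of segments and append the literal backslash-n only for full chunks, then concatenate the groups.
import Mathlib
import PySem

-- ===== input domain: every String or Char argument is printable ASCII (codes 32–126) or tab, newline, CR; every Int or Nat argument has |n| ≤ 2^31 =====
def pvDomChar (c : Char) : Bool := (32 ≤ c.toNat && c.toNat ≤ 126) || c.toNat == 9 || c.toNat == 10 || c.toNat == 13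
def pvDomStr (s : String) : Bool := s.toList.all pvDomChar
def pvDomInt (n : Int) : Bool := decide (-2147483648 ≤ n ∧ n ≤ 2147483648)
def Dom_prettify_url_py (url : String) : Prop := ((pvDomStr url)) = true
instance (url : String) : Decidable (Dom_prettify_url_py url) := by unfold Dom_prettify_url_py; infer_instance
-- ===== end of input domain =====

-- B replaces A's per-segment accumulation + modulo-3 counter by a chunk traversal (simpler decomposition).

-- ===== PORT A =====
-- literal port of A: split on '/', fold over words[1:] carrying (result, parts)
def prettify_url_py (url : String) : String :=
  let words := PySem.Chars.splitOn url.toList ['/']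
  let st := (PySem.List.slice words (some 1) none).foldl
    (fun (st : List Char × Int) i =>
      let result := st.1 ++ '/' :: i
      let parts := st.2 + 1
      if parts == 3 then (result ++ ['\\', 'n'], 0) else (result, parts))
    ([], 0)
  String.ofList st.1

-- ===== PORT B =====
-- literal port of B: chunk segs by 3 via range(0, len, 3), group = '/' + '/'.join(chunk) (+ literal "\n" if full), join groups
def prettify_url_py_alt (url : String) : String :=
  let segs := PySem.List.slice (PySem.Chars.splitOn url.toList ['/']) (some 1) none
  let groups := (PySem.List.pyRange 0 (segs.length : Int) 3).foldl
    (fun (acc : List (List Char)) i =>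
      let chunk := PySem.List.slice segs (some i) (some (i + 3))
      let g0 := '/' :: PySem.Chars.join ['/'] chunk
      let g := if chunk.length == 3 then g0 ++ ['\\', 'n'] else g0
      acc ++ [g]) []
  String.ofList (PySem.Chars.join [] groups)

-- ===== PRECONDITION & SPEC =====
def Spec_prettify_url_py (url : String) (out : String) : Prop := out = prettify_url_py_alt url
instance (url : String) (out : String) : Decidable (Spec_prettify_url_py url out) := by unfold Spec_prettify_url_py; infer_instance

-- ===== CLAIM (what is proved, stated in full; the proofs are below) =====
def Claim_equal_prettify_url_py : Prop := ∀ (url : String), Dom_prettify_url_py url → Spec_prettify_url_py url (prettify_url_py url)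

-- ===== LEMMAS AND PROOFS =====

-- reference result on the list of segments, consumed three at a time
def pvRef : List (List Char) → List Char
  | [] => []
  | [a] => '/' :: a
  | [a, b] => '/' :: a ++ '/' :: b
  | a :: b :: c :: rest => '/' :: a ++ '/' :: b ++ '/' :: c ++ ['\\', 'n'] ++ pvRef rest

-- A's fold, three steps at a time
lemma pvAfold (segs : List (List Char)) (acc : List Char) :
    (segs.foldl
      (fun (st : List Char × Int) i =>
        let result := st.1 ++ '/' :: i
        let parts := st.2 + 1
        if parts == 3 then (result ++ ['\\', 'n'], 0) else (result, parts))
      (acc, 0)).1 = acc ++ pvRef segs := by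
  match segs with
  | [] => simp [pvRef]
  | [a] => simp [pvRef, List.foldl]
  | [a, b] => simp [pvRef, List.foldl]
  | a :: b :: c :: rest =>
      have ih := pvAfold rest (acc ++ '/' :: a ++ '/' :: b ++ '/' :: c ++ ['\\', 'n'])
      simp only [List.foldl] at ih ⊢
      norm_num at ih ⊢
      rw [ih]
      simp [pvRef]

-- range(0, n, 3) as a mapped Nat range
lemma pvRange3 (n : Nat) :
    PySem.List.pyRange 0 (n : Int) 3 = (List.range ((n + 2) / 3)).map (fun k => ((3 * k : Nat) : Int)) := by
  unfold PySem.List.pyRange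
  by_cases h : 0 < n
  · simp only [if_neg (by norm_num : ¬ (3:Int) = 0)]
    rw [if_pos (by norm_num), if_pos (by exact_mod_cast h)]
    have hc : (((n : Int) - 0 + 3 - 1) / 3).toNat = (n + 2) / 3 := by omega
    rw [hc]
    apply List.map_congr_left
    intro k _
    push_cast
    ring
  · have hn : n = 0 := by omega
    subst hn
    norm_num

-- ''.join = flatten
lemma pvJoinNil (l : List (List Char)) : PySem.Chars.join [] l = l.flatten := by
  match l with
  | [] => simp [PySem.Chars.join_nil]
  | [x] => simp [PySem.Chars.join_singleton]
  | x :: y :: ys =>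
      rw [PySem.Chars.join_cons_cons, pvJoinNil (y :: ys)]
      simp

-- B's flattened groups equal pvRef
lemma pvBflat (segs : List (List Char)) :
    (((List.range ((segs.length + 2) / 3)).map
        (fun k =>
          let chunk := (segs.drop (3 * k)).take 3
          let g0 := '/' :: PySem.Chars.join ['/'] chunk
          if chunk.length == 3 then g0 ++ ['\\', 'n'] else g0)).flatten) = pvRef segs := by
  match segs with
  | [] => simp [pvRef]
  | [a] => simp [pvRef, PySem.Chars.join_singleton]
  | [a, b] => simp [pvRef, PySem.Chars.join_cons_cons]
  | a :: b :: c :: rest =>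
      have ih := pvBflat rest
      have hlen : (a :: b :: c :: rest).length + 2 = (rest.length + 2) + 3 := by simp
      have hcnt : ((a :: b :: c :: rest).length + 2) / 3 = (rest.length + 2) / 3 + 1 := by
        rw [hlen]; omega
      rw [hcnt, List.range_succ_eq_map]
      simp only [List.map_cons, List.map_map, List.flatten_cons]
      have hshift : ∀ k : Nat, (a :: b :: c :: rest).drop (3 * (k + 1)) = rest.drop (3 * k) := by
        intro k
        rw [show 3 * (k + 1) = 3 * k + 1 + 1 + 1 by ring]
        simp [List.drop_succ_cons]
      have hmap :
          (List.range ((rest.length + 2) / 3)).map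
              ((fun k =>
                  let chunk := ((a :: b :: c :: rest).drop (3 * k)).take 3
                  let g0 := '/' :: PySem.Chars.join ['/'] chunk
                  if chunk.length == 3 then g0 ++ ['\\', 'n'] else g0) ∘ (fun k => k + 1))
            = (List.range ((rest.length + 2) / 3)).map
              (fun k =>
                  let chunk := (rest.drop (3 * k)).take 3
                  let g0 := '/' :: PySem.Chars.join ['/'] chunk
                  if chunk.length == 3 then g0 ++ ['\\', 'n'] else g0) := by
        apply List.map_congr_left
        intro k _
        simp only [Function.comp]
        rw [hshift k]
      rw [hmap, ih]
      simp [pvRef, PySem.Chars.join_cons_cons, PySem.Chars.join_singleton]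

-- ===== VERDICT (by name: the statement is the Claim_ definition above) =====
theorem prettify_url_py_spec : Claim_equal_prettify_url_py := by
  intro url _
  unfold Spec_prettify_url_py prettify_url_py prettify_url_py_alt
  simp only [PySem.List.slice_from_one]
  set segs := (PySem.Chars.splitOn url.toList ['/']).tail with hsegs
  -- A side
  rw [pvAfold segs []]
  -- B side
  rw [PySem.List.foldl_append_singleton_eq_map]
  have hc : ∀ k : Nat,
      PySem.List.slice segs (some ((3 * k : Nat) : Int)) (some (((3 * k : Nat) : Int) + 3))
        = (segs.drop (3 * k)).take 3 := by
    intro k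
    have h3 : ((3 * k : Nat) : Int) + 3 = ((3 * k : Nat) : Int) + ((3 : Nat) : Int) := by norm_num
    rw [h3, PySem.List.slice_natCast_add]
  rw [pvRange3 segs.length]
  simp only [List.map_map, List.nil_append]
  have hmap :
      (List.range ((segs.length + 2) / 3)).map
          ((fun i =>
              let chunk := PySem.List.slice segs (some i) (some (i + 3))
              let g0 := '/' :: PySem.Chars.join ['/'] chunk
              if chunk.length == 3 then g0 ++ ['\\', 'n'] else g0) ∘ (fun k : Nat => ((3 * k : Nat) : Int)))
        = (List.range ((segs.length + 2) / 3)).map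
          (fun k =>
              let chunk := (segs.drop (3 * k)).take 3
              let g0 := '/' :: PySem.Chars.join ['/'] chunk
              if chunk.length == 3 then g0 ++ ['\\', 'n'] else g0) := by
    apply List.map_congr_left
    intro k _
    simp only [Function.comp]
    rw [hc k]
  rw [hmap, pvJoinNil, pvBflat segs]
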